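-- pv_equiv track=rewrite | github.com/rafainamdar04/locaLens | backend/services/anomaly.py | get_anomaly_severity
-- ===== SOURCE A (Python) =====
-- from typing import Tuple, List
--
-- def get_anomaly_severity(reasons: List[str]) -> str:
--     """
--     Classify anomaly severity based on detected reasons.
--
--     Args:
--         reasons: List of anomaly reason codes
--
--     Returns:
--         Severity level: "critical", "high", "medium", "low", or "none"
--     """
--     if not reasons:
--         return "none"
--
--     # Critical anomalies (data quality issues)
--     critical = {"low_integrity", "pincode_mismatch"}
--     if any(r in critical for r in reasons):
--         return "critical"
--
--     # High severity (low confidence)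
--     high = {"low_fused_conf", "low_here_conf"}
--     if any(r in high for r in reasons):
--         return "high"
--
--     # Medium severity (mismatch)
--     medium = {"ml_here_mismatch"}
--     if any(r in medium for r in reasons):
--         return "medium"
--
--     # Low severity (performance)
--     return "low"
-- ===== SOURCE B (Python) =====
-- from typing import List
--
-- _PRIORITY = {
--     "low_integrity": 4,
--     "pincode_mismatch": 4,
--     "low_fused_conf": 3,
--     "low_here_conf": 3,
--     "ml_here_mismatch": 2,
-- }
--
-- def get_anomaly_severity(reasons: List[str]) -> str:
--     if not reasons:
--         return "none"
--     m = 1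
--     for r in reasons:
--         p = _PRIORITY.get(r, 1)
--         if p > m:
--             m = p
--     return "critical" if m == 4 else "high" if m == 3 else "medium" if m == 2 else "low"
-- ===== Notes on version B (the rewrite author's own statement) =====
-- stated objective: alternative
-- what changed: Replaced the three sequential any() scans over per-tier sets by a single max-tracking pass over one reason-to-priority dict lookup, with a final priority-to-label mapping.
import Mathlib
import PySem

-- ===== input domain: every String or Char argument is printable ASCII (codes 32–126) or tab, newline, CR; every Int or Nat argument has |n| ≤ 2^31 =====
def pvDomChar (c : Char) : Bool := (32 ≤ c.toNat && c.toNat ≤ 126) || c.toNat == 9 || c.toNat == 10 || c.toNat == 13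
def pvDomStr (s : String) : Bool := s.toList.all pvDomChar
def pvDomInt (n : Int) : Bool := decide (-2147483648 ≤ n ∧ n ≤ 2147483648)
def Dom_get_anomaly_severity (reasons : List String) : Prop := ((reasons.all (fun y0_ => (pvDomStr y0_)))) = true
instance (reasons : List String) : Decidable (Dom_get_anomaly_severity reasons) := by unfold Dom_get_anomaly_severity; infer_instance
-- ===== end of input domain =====

-- B replaces A's three sequential any() scans with one max-tracking pass over a priority dict (alternative decomposition, same cost class).

-- ===== PORT A =====
def get_anomaly_severity (reasons : List String) : String :=
  if reasons = [] then "none"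
  else
    let critical : PySem.Set String := PySem.Set.ofList ["low_integrity", "pincode_mismatch"]
    if reasons.any (fun r => PySem.Set.contains critical r) then "critical"
    else
      let high : PySem.Set String := PySem.Set.ofList ["low_fused_conf", "low_here_conf"]
      if reasons.any (fun r => PySem.Set.contains high r) then "high"
      else
        let medium : PySem.Set String := PySem.Set.ofList ["ml_here_mismatch"]
        if reasons.any (fun r => PySem.Set.contains medium r) then "medium"
        else "low"

-- ===== PORT B =====
def pvPriority : PySem.Dict String Int :=
  PySem.Dict.ofList [("low_integrity", 4), ("pincode_mismatch", 4),
                     ("low_fused_conf", 3), ("low_here_conf", 3), ("ml_here_mismatch", 2)]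

def get_anomaly_severity_alt (reasons : List String) : String :=
  if reasons = [] then "none"
  else
    let m := reasons.foldl (fun m r =>
      let p := pvPriority.getD r 1
      if p > m then p else m) 1
    if m == 4 then "critical" else if m == 3 then "high" else if m == 2 then "medium" else "low"

-- ===== PRECONDITION & SPEC =====
def Spec_get_anomaly_severity (reasons : List String) (out : String) : Prop := out = get_anomaly_severity_alt reasons
instance (reasons : List String) (out : String) : Decidable (Spec_get_anomaly_severity reasons out) := by unfold Spec_get_anomaly_severity; infer_instance

-- ===== CLAIM (what is proved, stated in full; the proofs are below) =====
def Claim_equal_get_anomaly_severity : Prop := ∀ (reasons : List String), Dom_get_anomaly_severity reasons → Spec_get_anomaly_severity reasons (get_anomaly_severity reasons)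

-- ===== LEMMAS AND PROOFS =====

lemma pvPriority_getD (r : String) :
    pvPriority.getD r 1 =
      if r = "low_integrity" then 4 else if r = "pincode_mismatch" then 4
      else if r = "low_fused_conf" then 3 else if r = "low_here_conf" then 3
      else if r = "ml_here_mismatch" then 2 else 1 := by
  by_cases h1 : r = "low_integrity"
  · subst h1; decide
  by_cases h2 : r = "pincode_mismatch"
  · subst h2; decide
  by_cases h3 : r = "low_fused_conf"
  · subst h3; decide
  by_cases h4 : r = "low_here_conf"
  · subst h4; decide
  by_cases h5 : r = "ml_here_mismatch"
  · subst h5; decide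
  have hp : pvPriority = PySem.Dict.mk [("low_integrity", 4), ("pincode_mismatch", 4),
      ("low_fused_conf", 3), ("low_here_conf", 3), ("ml_here_mismatch", 2)] := by decide
  rw [hp]
  simp only [PySem.Dict.getD_eq_get?_getD, PySem.Dict.get?_mk_cons, beq_iff_eq,
    if_neg (Ne.symm h1), if_neg (Ne.symm h2), if_neg (Ne.symm h3), if_neg (Ne.symm h4),
    if_neg (Ne.symm h5), if_neg h1, if_neg h2, if_neg h3, if_neg h4, if_neg h5]
  rfl

lemma pv_foldl_char (l : List String) (a : Int) (ha : 1 ≤ a) :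
    l.foldl (fun m r => let p := pvPriority.getD r 1; if p > m then p else m) a =
      max a
        (if l.any (fun r => decide (r = "low_integrity") || decide (r = "pincode_mismatch")) then 4
         else if l.any (fun r => decide (r = "low_fused_conf") || decide (r = "low_here_conf")) then 3
         else if l.any (fun r => decide (r = "ml_here_mismatch")) then 2 else 1) := by
  induction l generalizing a with
  | nil => simp; omega
  | cons r t ih =>
    simp only [List.foldl_cons, List.any_cons]
    rw [ih _ (by simp only [pvPriority_getD]; split_ifs <;> omega)]
    by_cases h1 : r = "low_integrity"
    · subst h1; simp [pvPriority_getD]; split_ifs <;> omega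
    by_cases h2 : r = "pincode_mismatch"
    · subst h2; simp [pvPriority_getD]; split_ifs <;> omega
    by_cases h3 : r = "low_fused_conf"
    · subst h3; simp [pvPriority_getD]; split_ifs <;> omega
    by_cases h4 : r = "low_here_conf"
    · subst h4; simp [pvPriority_getD]; split_ifs <;> omega
    by_cases h5 : r = "ml_here_mismatch"
    · subst h5; simp [pvPriority_getD]; split_ifs <;> omega
    simp [pvPriority_getD, h1, h2, h3, h4, h5]
    split_ifs <;> omega

-- ===== VERDICT (by name: the statement is the Claim_ definition above) =====
theorem get_anomaly_severity_spec : Claim_equal_get_anomaly_severity := by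
  intro reasons _
  unfold Spec_get_anomaly_severity get_anomaly_severity get_anomaly_severity_alt
  by_cases hnil : reasons = []
  · simp [hnil]
  · simp only [hnil, if_false]
    rw [pv_foldl_char reasons 1 le_rfl]
    simp only [PySem.Set.ofList, PySem.Set.empty_eq, List.foldl_cons, List.not_mem_nil,
      not_false_eq_true, PySem.Set.add_of_not_mem, List.nil_append, List.mem_cons,
      String.reduceEq, or_self, List.cons_append, List.foldl_nil,
      PySem.Set.contains_eq_listContains, List.contains_eq_mem, or_false, Bool.decide_or,
      beq_iff_eq]
    split_ifs <;> first | rfl | omega
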